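-- pv_equiv track=rewrite | github.com/kriver/aoc-2020 | day6.py | part1
-- ===== SOURCE A (Python) =====
-- from typing import List
--
-- def part1(data: List[str]) -> int:
--     total = 0
--     group = set()
--     for line in data:
--         if line == '':
--             total += len(group)
--             group = set()
--         else:
--             group |= set(line)
--     total += len(group)
--     return total
-- ===== SOURCE B (Python) =====
-- from typing import List
--
--
-- def part1(data: List[str]) -> int:
--     # Two phases: partition the lines into groups, then reduce each group.
--     groups = []
--     current = []
--     for line in data:
--         if line == '':
--             groups.append(current)
--             current = []
--         else:
--             current.append(line)
--     groups.append(current)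
--     return sum(len(set(''.join(g))) for g in groups)
-- ===== Notes on version B (the rewrite author's own statement) =====
-- stated objective: alternative
-- what changed: B partitions the lines into a list of groups first and then sums len(set(''.join(g))) per group, instead of A's single streaming pass that accumulates a running set and resets it on each blank line.
import Mathlib
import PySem

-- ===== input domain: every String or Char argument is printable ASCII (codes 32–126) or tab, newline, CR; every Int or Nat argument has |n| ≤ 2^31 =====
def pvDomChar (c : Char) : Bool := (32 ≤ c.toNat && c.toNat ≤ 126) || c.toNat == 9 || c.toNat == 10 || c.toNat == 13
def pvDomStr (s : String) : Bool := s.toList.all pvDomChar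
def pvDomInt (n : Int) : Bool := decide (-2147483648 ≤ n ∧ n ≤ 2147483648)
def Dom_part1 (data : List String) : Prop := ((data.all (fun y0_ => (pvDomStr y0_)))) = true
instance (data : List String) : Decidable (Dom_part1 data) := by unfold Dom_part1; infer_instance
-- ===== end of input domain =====

-- B replaces A's streaming set-accumulator pass by a partition-into-groups-then-reduce decomposition; same cost (alternative).

-- ===== PORT A =====
def part1 (data : List String) : Int :=
  let st := data.foldl
    (fun (st : Int × PySem.Set Char) line =>
      if line == "" then (st.1 + PySem.Set.len st.2, PySem.Set.empty)
      else (st.1, PySem.Set.union st.2 (PySem.Set.ofList line.toList)))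
    (0, PySem.Set.empty)
  st.1 + PySem.Set.len st.2

-- ===== PORT B =====
-- ''.join(g) is exact as concatenation of the char lists
def pvJoinChars (g : List String) : List Char := (g.map String.toList).flatten

def part1_alt (data : List String) : Int :=
  let st := data.foldl
    (fun (st : List (List String) × List String) line =>
      if line == "" then (st.1 ++ [st.2], []) else (st.1, st.2 ++ [line]))
    ([], [])
  let groups := st.1 ++ [st.2]
  (groups.map (fun g => PySem.Set.len (PySem.Set.ofList (pvJoinChars g)))).sum

-- ===== PRECONDITION & SPEC =====
def Spec_part1 (data : List String) (out : Int) : Prop := out = part1_alt data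
instance (data : List String) (out : Int) : Decidable (Spec_part1 data out) := by unfold Spec_part1; infer_instance

-- ===== CLAIM (what is proved, stated in full; the proofs are below) =====
def Claim_equal_part1 : Prop := ∀ (data : List String), Dom_part1 data → Spec_part1 data (part1 data)

-- ===== LEMMAS AND PROOFS =====

-- len(set(''.join(g))) for a group g, as an Int
def pvF (g : List String) : Int := PySem.Set.len (PySem.Set.ofList (pvJoinChars g))

lemma pvUpdate_ofList {α : Type} [BEq α] [LawfulBEq α] (s : PySem.Set α) (ys : List α) :
    PySem.Set.update s (PySem.Set.ofList ys) = PySem.Set.update s ys := by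
  rw [PySem.Set.update_eq_append_filter, PySem.Set.update_eq_append_filter,
    PySem.Set.ofList_ofList]

lemma pvJoin_append (cur : List String) (line : String) :
    pvJoinChars (cur ++ [line]) = pvJoinChars cur ++ line.toList := by
  simp [pvJoinChars]

lemma pvLoop_eq (data : List String) (gs : List (List String)) (cur : List String) :
    ((data.foldl
        (fun (st : Int × PySem.Set Char) line =>
          if line == "" then (st.1 + PySem.Set.len st.2, PySem.Set.empty)
          else (st.1, PySem.Set.union st.2 (PySem.Set.ofList line.toList)))
        ((gs.map pvF).sum, PySem.Set.ofList (pvJoinChars cur))).1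
      + PySem.Set.len (data.foldl
        (fun (st : Int × PySem.Set Char) line =>
          if line == "" then (st.1 + PySem.Set.len st.2, PySem.Set.empty)
          else (st.1, PySem.Set.union st.2 (PySem.Set.ofList line.toList)))
        ((gs.map pvF).sum, PySem.Set.ofList (pvJoinChars cur))).2)
    = (((data.foldl
        (fun (st : List (List String) × List String) line =>
          if line == "" then (st.1 ++ [st.2], []) else (st.1, st.2 ++ [line]))
        (gs, cur)).1
      ++ [(data.foldl
        (fun (st : List (List String) × List String) line =>
          if line == "" then (st.1 ++ [st.2], []) else (st.1, st.2 ++ [line]))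
        (gs, cur)).2]).map pvF).sum := by
  induction data generalizing gs cur with
  | nil => simp [pvF]
  | cons line rest ih =>
    simp only [List.foldl_cons]
    by_cases h : line = ""
    · subst h
      simp only [beq_self_eq_true, if_true]
      have h1 : (gs.map pvF).sum + PySem.Set.len (PySem.Set.ofList (pvJoinChars cur))
          = (((gs ++ [cur]).map pvF)).sum := by simp [pvF]
      have h2 : (PySem.Set.empty : PySem.Set Char)
          = PySem.Set.ofList (pvJoinChars []) := rfl
      rw [h1, h2]
      exact ih (gs ++ [cur]) []
    · have hb : (line == "") = false := by simpa using h
      simp only [hb]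
      have h3 : PySem.Set.union (PySem.Set.ofList (pvJoinChars cur))
            (PySem.Set.ofList line.toList)
          = PySem.Set.ofList (pvJoinChars (cur ++ [line])) := by
        show PySem.Set.update (PySem.Set.ofList (pvJoinChars cur))
            (PySem.Set.ofList line.toList) = _
        rw [pvUpdate_ofList, pvJoin_append, PySem.Set.ofList_append]
      rw [h3]
      exact ih gs (cur ++ [line])

-- ===== VERDICT (by name: the statement is the Claim_ definition above) =====
theorem part1_spec : Claim_equal_part1 := by
  intro data _
  unfold Spec_part1 part1 part1_alt
  simpa [pvF, pvJoinChars] using pvLoop_eq data [] []
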